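-- pv_equiv track=rewrite | github.com/dfennell42/LCO-Workflow | src/lco_workflow/check_contcar.py | fix_contcar
-- ===== SOURCE A (Python) =====
-- def fix_contcar(clines,plines):
--     '''Replaces bad CONTCAR lines with lines from POSCAR'''
--     new_lines=[]
--     bad_idx = [5,6,7,8,9]
--     for i,line in enumerate(clines):
--         if i not in bad_idx:
--             new_lines.append(line)
--         elif i == 5:
--             new_lines.append(plines[5])
--         elif i == 7:
--             new_lines.append(plines[6])
--         elif i == 6 or i == 8:
--             pass
--         elif i == 9:
--             if clines[9].isalpha():
--                 pass
--             else:
--                 new_lines.append('Direct\n')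
--                 new_lines.append(clines[9])
--     return new_lines
-- ===== SOURCE B (Python) =====
-- def fix_contcar(clines, plines):
--     '''Replaces bad CONTCAR lines with lines from POSCAR'''
--     new_lines = list(clines[:5])
--     n = len(clines)
--     if n > 5:
--         new_lines.append(plines[5])
--     if n > 7:
--         new_lines.append(plines[6])
--     if n > 9:
--         if not clines[9].isalpha():
--             new_lines.append('Direct\n')
--             new_lines.append(clines[9])
--     new_lines += clines[10:]
--     return new_lines
-- ===== Notes on version B (the rewrite author's own statement) =====
-- stated objective: simpler
-- what changed: Replaces the per-line enumerate loop with membership tests by direct slicing: copy clines[:5], append the three length-gated patch lines, then append clines[10:].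
import Mathlib
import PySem

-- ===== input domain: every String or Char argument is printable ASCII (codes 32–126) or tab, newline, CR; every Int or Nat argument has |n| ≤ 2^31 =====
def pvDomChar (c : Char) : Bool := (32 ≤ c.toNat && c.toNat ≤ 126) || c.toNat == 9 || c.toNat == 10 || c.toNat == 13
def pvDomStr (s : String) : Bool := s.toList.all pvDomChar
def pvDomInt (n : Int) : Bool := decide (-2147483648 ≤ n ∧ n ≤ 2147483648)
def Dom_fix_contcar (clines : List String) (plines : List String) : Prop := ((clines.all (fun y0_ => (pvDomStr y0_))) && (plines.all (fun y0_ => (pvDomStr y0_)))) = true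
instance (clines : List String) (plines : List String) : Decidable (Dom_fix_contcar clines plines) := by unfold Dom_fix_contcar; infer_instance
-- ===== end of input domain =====

-- ===== PORT A =====
-- Header: B builds the result by slicing (clines[:5], three gated appends, clines[10:]) instead of
-- looping over every line with index membership tests; objective: simpler.
-- Step function of A's loop over enumerate(clines) (named helper; the branch order is A's).
def fixStep (clines : List String) (plines : List String)
    (acc : List String) (p : Int × String) : List String :=
  if ¬ (p.1 = 5 ∨ p.1 = 6 ∨ p.1 = 7 ∨ p.1 = 8 ∨ p.1 = 9) then acc ++ [p.2]
  else if p.1 = 5 then acc ++ [(PySem.List.pyGet? plines 5).getD ""]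
  else if p.1 = 7 then acc ++ [(PySem.List.pyGet? plines 6).getD ""]
  else if p.1 = 6 ∨ p.1 = 8 then acc
  else if p.1 = 9 then
    if PySem.Str.strIsalpha ((PySem.List.pyGet? clines 9).getD "") then acc
    else acc ++ ["Direct\n", (PySem.List.pyGet? clines 9).getD ""]
  else acc

def fix_contcar (clines : List String) (plines : List String) : List String :=
  (PySem.List.enumerate clines).foldl (fixStep clines plines) []

-- ===== PORT B =====
def fix_contcar_alt (clines : List String) (plines : List String) : List String :=
  let new0 := PySem.List.slice clines none (some 5)
  let n := clines.length
  let new1 := if n > 5 then new0 ++ [(PySem.List.pyGet? plines 5).getD ""] else new0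
  let new2 := if n > 7 then new1 ++ [(PySem.List.pyGet? plines 6).getD ""] else new1
  let new3 := if n > 9 then
      (if ¬ PySem.Str.strIsalpha ((PySem.List.pyGet? clines 9).getD "") then
        new2 ++ ["Direct\n", (PySem.List.pyGet? clines 9).getD ""] else new2)
    else new2
  new3 ++ PySem.List.slice clines (some 10) none

-- ===== PRECONDITION & SPEC =====
-- Pre_ excludes exactly the inputs where Python A raises IndexError: plines[5] needs
-- len(plines) > 5 once len(clines) > 5, and plines[6] needs len(plines) > 6 once len(clines) > 7.
def Pre_fix_contcar (clines : List String) (plines : List String) : Prop :=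
  (clines.length ≤ 5 ∨ 5 < plines.length) ∧ (clines.length ≤ 7 ∨ 6 < plines.length)
instance (clines : List String) (plines : List String) : Decidable (Pre_fix_contcar clines plines) := by
  unfold Pre_fix_contcar; infer_instance
def pvWitness_fix_contcar : List String × List String :=
  (["a\n", "b\n", "1.0 0 0\n", "0 1.0 0\n", "0 0 1.0\n", "Li Co\n", "2 2\n",
    "Direct\n", "0.5 0.5 0.5\n", "0.1 0.2 0.3\n"],
   ["p0\n", "p1\n", "p2\n", "p3\n", "p4\n", "Li Co O\n", "2 2 4\n"])

def Spec_fix_contcar (clines : List String) (plines : List String) (out : List String) : Prop := out = fix_contcar_alt clines plines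
instance (clines : List String) (plines : List String) (out : List String) : Decidable (Spec_fix_contcar clines plines out) := by unfold Spec_fix_contcar; infer_instance

-- ===== CLAIM (what is proved, stated in full; the proofs are below) =====
def Claim_equal_fix_contcar : Prop := ∀ (clines : List String) (plines : List String), Dom_fix_contcar clines plines → Pre_fix_contcar clines plines → Spec_fix_contcar clines plines (fix_contcar clines plines)

-- ===== LEMMAS AND PROOFS =====

-- Past index 9, A's loop only appends the current line.
theorem foldl_fixStep_high (clines plines : List String) (rest : List String) :
    ∀ (s : Int) (acc : List String), 10 ≤ s →
      (PySem.List.enumerate rest s).foldl (fixStep clines plines) acc = acc ++ rest := by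
  induction rest with
  | nil => intro s acc _; simp [PySem.List.enumerate_nil]
  | cons x xs ih =>
    intro s acc hs
    rw [PySem.List.enumerate_cons]
    simp only [List.foldl_cons]
    have hstep : fixStep clines plines acc (s, x) = acc ++ [x] := by
      unfold fixStep; simp only
      have : ¬ (s = 5 ∨ s = 6 ∨ s = 7 ∨ s = 8 ∨ s = 9) := by omega
      rw [if_pos this]
    rw [hstep, ih (s + 1) (acc ++ [x]) (by omega)]
    simp

-- ===== VERDICT (by name: the statement is the Claim_ definition above) =====
theorem fix_contcar_spec : Claim_equal_fix_contcar := by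
  intro clines plines _ hpre
  unfold Spec_fix_contcar
  match clines with
  | [] => rfl
  | [a] => rfl
  | [a,b] => rfl
  | [a,b,c] => rfl
  | [a,b,c,d] => rfl
  | [a,b,c,d,e] => rfl
  | [a,b,c,d,e,f] =>
      simp [fix_contcar, fix_contcar_alt, fixStep, PySem.List.enumerate_cons,
            PySem.List.enumerate_nil, PySem.List.slice, PySem.List.pyGet?]
  | [a,b,c,d,e,f,g] =>
      simp [fix_contcar, fix_contcar_alt, fixStep, PySem.List.enumerate_cons,
            PySem.List.enumerate_nil, PySem.List.slice, PySem.List.pyGet?]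
  | [a,b,c,d,e,f,g,h] =>
      simp [fix_contcar, fix_contcar_alt, fixStep, PySem.List.enumerate_cons,
            PySem.List.enumerate_nil, PySem.List.slice, PySem.List.pyGet?]
  | [a,b,c,d,e,f,g,h,i] =>
      simp [fix_contcar, fix_contcar_alt, fixStep, PySem.List.enumerate_cons,
            PySem.List.enumerate_nil, PySem.List.slice, PySem.List.pyGet?]
  | a::b::c::d::e::f::g::h::i::j::rest =>
      have h10 : PySem.List.enumerate (a::b::c::d::e::f::g::h::i::j::rest) 0
          = (0,a)::(1,b)::(2,c)::(3,d)::(4,e)::(5,f)::(6,g)::(7,h)::(8,i)::(9,j)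
            :: PySem.List.enumerate rest 10 := by
        simp [PySem.List.enumerate_cons]
      unfold fix_contcar
      rw [h10]
      simp only [List.foldl_cons]
      rw [foldl_fixStep_high _ _ rest 10 _ (by omega)]
      simp [fix_contcar_alt, fixStep, PySem.List.slice, PySem.List.pyGet?]
      split <;> simp_all
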